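-- pv_equiv track=rewrite | github.com/newagedigitaluk/BetterCallWes | website/social/post_daily.py | get_next_post
-- ===== SOURCE A (Python) =====
-- def get_next_post(bank: dict) -> dict | None:
--     """Return first approved post, or first pending post if none approved."""
--     for post in bank["posts"]:
--         if post.get("status") == "approved":
--             return post
--     for post in bank["posts"]:
--         if post.get("status") == "pending":
--             return post
--     return None
-- ===== SOURCE B (Python) =====
-- def get_next_post(bank: dict) -> dict | None:
--     """Return first approved post, or first pending post if none approved."""
--     best = None
--     for post in reversed(bank["posts"]):
--         s = post.get("status")
--         if s == "approved":
--             best = post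
--         elif s == "pending" and (best is None or best.get("status") != "approved"):
--             best = post
--     return best
-- ===== Notes on version B (the rewrite author's own statement) =====
-- stated objective: alternative
-- what changed: Replaces A's two forward scans with a single backward pass over reversed(bank['posts']) that keeps the best-so-far post of the suffix (an approved post wins over, and is never displaced by, a pending one), so the output is built back-to-front instead of searched for front-to-back.
-- outside the precondition, e.g. on get_next_post({}): A raises KeyError, B raises KeyError
import Mathlib
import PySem

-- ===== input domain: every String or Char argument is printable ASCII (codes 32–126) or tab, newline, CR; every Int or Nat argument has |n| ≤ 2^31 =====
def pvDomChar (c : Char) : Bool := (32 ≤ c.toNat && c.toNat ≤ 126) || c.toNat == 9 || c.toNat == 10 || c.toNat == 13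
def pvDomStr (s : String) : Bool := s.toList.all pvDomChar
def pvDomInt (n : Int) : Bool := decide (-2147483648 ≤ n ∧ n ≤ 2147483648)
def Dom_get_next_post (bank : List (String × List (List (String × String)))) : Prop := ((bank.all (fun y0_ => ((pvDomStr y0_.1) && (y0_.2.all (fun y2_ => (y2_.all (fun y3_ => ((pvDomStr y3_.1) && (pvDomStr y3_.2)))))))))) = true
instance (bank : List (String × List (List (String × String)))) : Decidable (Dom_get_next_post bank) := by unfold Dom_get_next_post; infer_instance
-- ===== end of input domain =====

-- B replaces A's two forward scans with one backward pass keeping the best post of the suffix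
-- (alternative decomposition; same return value on Pre_).

-- ===== PORT A =====
-- assoc-list lookup, first match (Python dict semantics for our association-list encoding)
def pvLookup {v : Type} (l : List (String × v)) (k : String) : Option v :=
  match l with
  | [] => none
  | (k', x) :: rest => if k' == k then some x else pvLookup rest k

-- first loop of A: 'for post in posts: if post.get("status") == "approved": return post'
def pvFindApproved (posts : List (List (String × String))) : Option (List (String × String)) :=
  match posts with
  | [] => none
  | p :: rest => if pvLookup p "status" = some "approved" then some p else pvFindApproved rest

-- second loop of A
def pvFindPending (posts : List (List (String × String))) : Option (List (String × String)) :=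
  match posts with
  | [] => none
  | p :: rest => if pvLookup p "status" = some "pending" then some p else pvFindPending rest

def get_next_post (bank : List (String × List (List (String × String)))) : Option (List (String × String)) :=
  let posts := (pvLookup bank "posts").getD []   -- Pre_ guarantees the key exists; Python raises KeyError otherwise
  match pvFindApproved posts with
  | some p => some p
  | none => pvFindPending posts

-- ===== PORT B =====
-- loop body of Source B (one step of the backward pass over reversed posts)
def pvStepB (best : Option (List (String × String))) (post : List (String × String)) :
    Option (List (String × String)) :=
  let s := pvLookup post "status"
  if s == some "approved" then some post
  else if s == some "pending" &&
      (match best with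
       | none => true
       | some q => !(pvLookup q "status" == some "approved")) then some post
  else best

def get_next_post_alt (bank : List (String × List (List (String × String)))) : Option (List (String × String)) :=
  -- 'for post in reversed(posts): best = step(best, post)'
  (((pvLookup bank "posts").getD []).reverse).foldl pvStepB none

-- ===== PRECONDITION & SPEC =====
-- Pre_ excludes only banks without a "posts" key, on which Python A (and B) raises KeyError.
def Pre_get_next_post (bank : List (String × List (List (String × String)))) : Prop :=
  "posts" ∈ bank.map Prod.fst
instance (bank : List (String × List (List (String × String)))) : Decidable (Pre_get_next_post bank) := by unfold Pre_get_next_post; infer_instance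
def pvWitness_get_next_post : (List (String × List (List (String × String)))) :=
  [("posts", [[("status", "pending")], [("status", "approved")]])]
def Spec_get_next_post (bank : List (String × List (List (String × String)))) (out : Option (List (String × String))) : Prop := out = get_next_post_alt bank
instance (bank : List (String × List (List (String × String)))) (out : Option (List (String × String))) : Decidable (Spec_get_next_post bank out) := by unfold Spec_get_next_post; infer_instance

-- ===== CLAIM (what is proved, stated in full; the proofs are below) =====
def Claim_equal_get_next_post : Prop := ∀ (bank : List (String × List (List (String × String)))), Dom_get_next_post bank → Pre_get_next_post bank → Spec_get_next_post bank (get_next_post bank)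

-- ===== LEMMAS AND PROOFS =====
theorem pvFindApproved_status (posts : List (List (String × String))) (q : List (String × String))
    (h : pvFindApproved posts = some q) : pvLookup q "status" = some "approved" := by
  induction posts with
  | nil => simp [pvFindApproved] at h
  | cons p rest ih =>
    simp only [pvFindApproved] at h
    split at h
    · cases h; assumption
    · exact ih h

theorem pvFindPending_status (posts : List (List (String × String))) (q : List (String × String))
    (h : pvFindPending posts = some q) : pvLookup q "status" = some "pending" := by
  induction posts with
  | nil => simp [pvFindPending] at h
  | cons p rest ih =>
    simp only [pvFindPending] at h
    split at h
    · cases h; assumption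
    · exact ih h

theorem pvFoldB_eq (posts : List (List (String × String))) :
    posts.reverse.foldl pvStepB none = (pvFindApproved posts).or (pvFindPending posts) := by
  induction posts with
  | nil => simp [pvFindApproved, pvFindPending]
  | cons p rest ih =>
    have hfold : (p :: rest).reverse.foldl pvStepB none = pvStepB (rest.reverse.foldl pvStepB none) p := by
      simp [List.reverse_cons, List.foldl_append]
    rw [hfold, ih]
    simp only [pvFindApproved, pvFindPending, pvStepB]
    by_cases ha : pvLookup p "status" = some "approved"
    · simp [ha]
    · have ha' : (pvLookup p "status" == some "approved") = false := by
        simp [ha]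
      by_cases hp : pvLookup p "status" = some "pending"
      · cases hFA : pvFindApproved rest with
        | some q =>
          have hq := pvFindApproved_status rest q hFA
          simp [hp, hq, Option.or]
        | none =>
          cases hFP : pvFindPending rest with
          | some r =>
            have hr := pvFindPending_status rest r hFP
            have : pvLookup r "status" ≠ some "approved" := by simp [hr]
            simp [hp, this, Option.or]
          | none => simp [hp, Option.or]
      · have hp' : (pvLookup p "status" == some "pending") = false := by
          simp [hp]
        simp [ha, ha', hp, hp', Option.or]

-- ===== VERDICT (by name: the statement is the Claim_ definition above) =====
theorem get_next_post_spec : Claim_equal_get_next_post := by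
  intro bank _ _
  unfold Spec_get_next_post get_next_post get_next_post_alt
  rw [pvFoldB_eq]
  cases h : pvFindApproved ((pvLookup bank "posts").getD []) <;> simp [h, Option.or]
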